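-- pv_equiv track=rewrite | github.com/jasper-lov/spellwizard | edit_distance_algorithms.py | spell_checker_recursive
-- ===== SOURCE A (Python) =====
-- import collections
--
-- def editDistanceRec(S , T ):
--     #recursive case: when S is empty, it will require n appends to transform S into T, thus the edit distance from S to T is n;
--     #when T is empty, it will require m deletes to transform S into T, thus the edit distance from S to T is m;
--     #however no matter what the case is the edit distance will always equal to m *n
--     if len(S) == 0 or len(T) == 0:
--         return len(T) + len(S)
--     else:
--         #recursive cases
--         m = len(S)
--         n = len(T)
--         #when the last two elements are equal to eachother, the amount of operations required to transform S to T will be the amounf of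
--         #operations needed to transform all of S excluding its last item to all of T excluding its last item
--         if S[m-1] == T[n-1]:
--             return editDistanceRec(S[0:m-1],T[0:n-1])
--         #When the last two elements are not equal to eachother, the edit distance from S to T is the minimum of a replacement of S[m-1] with
--         # T[n-1] and edit distance upon S[0...m-2] and T[0...n-2], a deletion of S[m-1] and edit distance upon S[0...m-2] and T[0...n-1], or
--         # a insertion of T[m-1] at the end of S and edit distance upon S[0...m-1] and T[0...n-2]
--         else:
--             return 1 + min(editDistanceRec(S[0:m-1],T[0:n-1]),editDistanceRec(S[0:m-1],T),editDistanceRec(S,T[0:n-1]))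
--
-- def spell_checker_recursive(t, d):
--     #Dictionary to hold the answer
--     output_dict = collections.defaultdict(list)
--
--     #Iterate over every word in T
--     for word in t:
--         #If word is not in the dictionary calculate its edit distance and append it to a list
--         if word not in d:
--             possible_corrections = []
--
--             for correct_word in d:
--                 dist = editDistanceRec(word, correct_word)
--                 possible_corrections.append((correct_word, dist))
--
--             #Sort the possible corrections by edit distance
--             possible_corrections = sorted(possible_corrections, key = lambda x: x[1])
--             #Assign
--             for i in range(5):
--                 output_dict[word].append(possible_corrections[i][0])
--
--     return output_dict
-- ===== SOURCE B (Python) =====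
-- def _lev(a, b):
--     # Wagner-Fischer DP: one row at a time, with the equal-char shortcut.
--     prev = list(range(len(b) + 1))
--     for i, ca in enumerate(a, 1):
--         cur = [i]
--         for cb, up_left, up in zip(b, prev, prev[1:]):
--             if ca == cb:
--                 cur.append(up_left)
--             else:
--                 cur.append(1 + min(up_left, min(up, cur[-1])))
--         prev = cur
--     return prev[-1]
--
-- def spell_checker_recursive(t, d):
--     dwords = set(d)
--     out = {}
--     for word in t:
--         if word not in dwords:
--             scored = sorted(((w, _lev(word, w)) for w in d), key=lambda p: p[1])
--             out.setdefault(word, []).extend(w for w, _ in scored[:5])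
--     return out
-- ===== Notes on version B (the rewrite author's own statement) =====
-- stated objective: faster
-- what changed: Replaces the exponential 3-way recursive edit distance by a row-by-row Wagner-Fischer dynamic program (and a set for the dictionary-membership test).
-- crash fix: When some word of t is missing from a dictionary d of fewer than 5 entries, A raises IndexError (possible_corrections[i] for i in range(5) overruns); B returns that word's candidates, i.e. all of d sorted by distance. — e.g. on spell_checker_recursive(["a"], []): A raises IndexError, B returns [("a", [])]
import Mathlib
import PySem

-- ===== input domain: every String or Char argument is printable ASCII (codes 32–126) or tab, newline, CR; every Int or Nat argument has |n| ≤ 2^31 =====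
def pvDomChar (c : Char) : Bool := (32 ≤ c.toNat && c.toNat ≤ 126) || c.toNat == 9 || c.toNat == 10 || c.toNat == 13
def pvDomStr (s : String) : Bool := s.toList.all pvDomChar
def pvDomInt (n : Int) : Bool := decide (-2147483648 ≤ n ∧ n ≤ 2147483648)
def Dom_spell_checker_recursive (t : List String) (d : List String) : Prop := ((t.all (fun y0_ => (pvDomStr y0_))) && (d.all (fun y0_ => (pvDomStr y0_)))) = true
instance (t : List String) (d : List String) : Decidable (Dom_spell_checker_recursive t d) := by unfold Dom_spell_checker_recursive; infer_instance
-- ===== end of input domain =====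

-- B replaces A's exponential 3-way recursion for the edit distance by a row-by-row
-- Wagner–Fischer dynamic program (objective: faster, asymptotic).

-- ===== PORT A =====

-- termination helper for the port's recursion (cited in decreasing_by)
theorem pv_len_slice_pred {α : Type} (S : List α) (h : ¬ S.length = 0) :
    (PySem.List.slice S (some 0) (some ((S.length : Int) - 1))).length = S.length - 1 := by
  rw [PySem.List.slice_zero_start,
     PySem.List.slice_to S (b := (S.length : Int) - 1) (by omega)]
  simp [List.length_take]

-- editDistanceRec(S, T): the 3-way last-character recursion, slices ported with PySem.List.slice,
-- S[m-1]/T[n-1] with PySem.List.pyGetD (always in range here: the branch has m, n ≥ 1).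
def editDistanceRecA (S T : List Char) : Int :=
  if h : S.length = 0 ∨ T.length = 0 then (T.length : Int) + (S.length : Int)
  else
    let m := S.length
    let n := T.length
    if PySem.List.pyGetD S ((m : Int) - 1) default == PySem.List.pyGetD T ((n : Int) - 1) default then
      editDistanceRecA (PySem.List.slice S (some 0) (some ((m : Int) - 1)))
                       (PySem.List.slice T (some 0) (some ((n : Int) - 1)))
    else
      1 + min (editDistanceRecA (PySem.List.slice S (some 0) (some ((m : Int) - 1)))
                                (PySem.List.slice T (some 0) (some ((n : Int) - 1))))
              (min (editDistanceRecA (PySem.List.slice S (some 0) (some ((m : Int) - 1))) T)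
                   (editDistanceRecA S (PySem.List.slice T (some 0) (some ((n : Int) - 1)))))
termination_by S.length + T.length
decreasing_by
  · push Not at h; rw [pv_len_slice_pred S h.1, pv_len_slice_pred T h.2]; omega
  · push Not at h; rw [pv_len_slice_pred S h.1, pv_len_slice_pred T h.2]; omega
  · push Not at h; rw [pv_len_slice_pred S h.1]; omega
  · push Not at h; rw [pv_len_slice_pred T h.2]; omega

-- spell_checker_recursive: defaultdict(list) as PySem.Dict, output_dict[word].append(x) = modify word [] (· ++ [x])
def spell_checker_recursive (t : List String) (d : List String) : List (String × List String) :=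
  (t.foldl (fun (od : PySem.Dict String (List String)) word =>
      if word ∉ d then
        let pcs := d.foldl (fun acc cw => acc ++ [(cw, editDistanceRecA word.toList cw.toList)])
                     ([] : List (String × Int))
        let pcss := PySem.List.sorted pcs (fun x => x.2) false
        (PySem.List.pyRange 0 5 1).foldl
          (fun od' i => od'.modify word [] (fun l => l ++ [(PySem.List.pyGetD pcss i ("", 0)).1])) od
      else od)
    PySem.Dict.empty).items

-- ===== PORT B =====

-- _lev(a, b): one DP row at a time; zip(b, prev, prev[1:]) as b.zip (prev.zip prev[1:]),
-- cur[-1] and prev[-1] with PySem.List.pyGetD at -1 (cur and prev are never empty).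
def levAlt (a b : List Char) : Int :=
  let prev0 := PySem.List.pyRange 0 ((b.length : Int) + 1) 1
  let prev := (PySem.List.enumerate a 1).foldl
    (fun prev ic =>
      (b.zip (prev.zip (PySem.List.slice prev (some 1) none))).foldl
        (fun cur x =>
          if ic.2 == x.1 then cur ++ [x.2.1]
          else cur ++ [1 + min x.2.1 (min x.2.2 (PySem.List.pyGetD cur (-1) 0))])
        ([ic.1] : List Int))
    prev0
  PySem.List.pyGetD prev (-1) 0

-- out.setdefault(word, []).extend(ws) = modify word [] (· ++ ws)
def spell_checker_recursive_alt (t : List String) (d : List String) : List (String × List String) :=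
  let dwords := PySem.Set.ofList d
  (t.foldl (fun (out : PySem.Dict String (List String)) word =>
      if PySem.Set.contains dwords word then out
      else
        let scored := PySem.List.sorted (d.map (fun w => (w, levAlt word.toList w.toList)))
                        (fun p => p.2) false
        out.modify word [] (fun l => l ++ (PySem.List.slice scored none (some 5)).map (·.1)))
    PySem.Dict.empty).items

-- ===== PRECONDITION & SPEC =====
-- Pre_ excludes exactly the inputs where A raises IndexError: some word of t is outside d
-- while d has fewer than 5 entries (possible_corrections[i] for i in range(5) then overruns).
def Pre_spell_checker_recursive (t : List String) (d : List String) : Prop :=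
  (∀ w ∈ t, w ∈ d) ∨ 5 ≤ d.length
instance (t : List String) (d : List String) : Decidable (Pre_spell_checker_recursive t d) := by
  unfold Pre_spell_checker_recursive; infer_instance

def pvWitness_spell_checker_recursive : List String × List String :=
  (["hej"], ["cat", "dog", "fish", "bird", "cow"])

-- A raises IndexError when some word of t is missing from a dictionary of fewer than 5 words;
-- B returns that word's (at most 4) candidates, all of d sorted by distance.
def Raises_spell_checker_recursive (t : List String) (d : List String) : Prop :=
  (∃ w ∈ t, w ∉ d) ∧ d.length < 5
instance (t : List String) (d : List String) : Decidable (Raises_spell_checker_recursive t d) := by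
  unfold Raises_spell_checker_recursive; infer_instance

def pvRaiseWitness_spell_checker_recursive : List String × List String := (["a"], [])
def pvRaiseWitnessOut_spell_checker_recursive : List (String × List String) := [("a", [])]

def Spec_spell_checker_recursive (t : List String) (d : List String) (out : List (String × List String)) : Prop := out = spell_checker_recursive_alt t d
instance (t : List String) (d : List String) (out : List (String × List String)) : Decidable (Spec_spell_checker_recursive t d out) := by unfold Spec_spell_checker_recursive; infer_instance

-- ===== CLAIM (what is proved, stated in full; the proofs are below) =====
def Claim_equal_spell_checker_recursive : Prop := ∀ (t : List String) (d : List String), Dom_spell_checker_recursive t d → Pre_spell_checker_recursive t d → Spec_spell_checker_recursive t d (spell_checker_recursive t d)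

def Claim_raises_spell_checker_recursive : Prop := (∀ (t : List String) (d : List String), Dom_spell_checker_recursive t d → Raises_spell_checker_recursive t d → ¬ Pre_spell_checker_recursive t d) ∧ (Dom_spell_checker_recursive (pvRaiseWitness_spell_checker_recursive.1) (pvRaiseWitness_spell_checker_recursive.2) ∧ Raises_spell_checker_recursive (pvRaiseWitness_spell_checker_recursive.1) (pvRaiseWitness_spell_checker_recursive.2) ∧ spell_checker_recursive_alt (pvRaiseWitness_spell_checker_recursive.1) (pvRaiseWitness_spell_checker_recursive.2) = pvRaiseWitnessOut_spell_checker_recursive)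

-- ===== LEMMAS AND PROOFS =====

theorem edA_nil_left (T : List Char) : editDistanceRecA [] T = (T.length : Int) := by
  rw [editDistanceRecA]; simp

theorem edA_nil_right (S : List Char) : editDistanceRecA S [] = (S.length : Int) := by
  rw [editDistanceRecA]; simp


theorem pyGetD_last_append (xs : List Char) (x d : Char) :
    PySem.List.pyGetD (xs ++ [x]) (((xs ++ [x]).length : Int) - 1) d = x := by
  have h : ((xs ++ [x]).length : Int) - 1 = ((xs.length : Nat) : Int) := by simp
  rw [h, PySem.List.pyGetD_natCast]
  simp [List.getD]

theorem slice_pred_append {α : Type} (xs : List α) (x : α) :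
    PySem.List.slice (xs ++ [x]) (some 0) (some (((xs ++ [x]).length : Int) - 1)) = xs := by
  rw [PySem.List.slice_zero_start,
      PySem.List.slice_to (xs ++ [x]) (b := ((xs ++ [x]).length : Int) - 1) (by simp)]
  have h : (((xs ++ [x]).length : Int) - 1).toNat = xs.length := by simp
  rw [h, List.take_left]

theorem edA_step (xs ys : List Char) (a b : Char) :
    editDistanceRecA (xs ++ [a]) (ys ++ [b]) =
      if a == b then editDistanceRecA xs ys
      else 1 + min (editDistanceRecA xs ys)
                   (min (editDistanceRecA xs (ys ++ [b])) (editDistanceRecA (xs ++ [a]) ys)) := by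
  conv_lhs => rw [editDistanceRecA]
  rw [dif_neg (by simp)]
  simp only [pyGetD_last_append, slice_pred_append]

-- the DP row i: edit distances from A's first i characters to every prefix of B
def pvRow (A B : List Char) (i : Nat) : List Int :=
  (List.range (B.length + 1)).map (fun j => editDistanceRecA (A.take i) (B.take j))

theorem edA_take_step (A B : List Char) (i k : Nat) (hi : i < A.length) (hk : k < B.length) :
    editDistanceRecA (A.take (i+1)) (B.take (k+1)) =
      if A[i] == B[k] then editDistanceRecA (A.take i) (B.take k)
      else 1 + min (editDistanceRecA (A.take i) (B.take k))
                   (min (editDistanceRecA (A.take i) (B.take (k+1)))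
                        (editDistanceRecA (A.take (i+1)) (B.take k))) := by
  have ha : A.take (i+1) = A.take i ++ [A[i]] := by
    rw [List.take_add_one]; simp [List.getElem?_eq_getElem hi]
  have hb : B.take (k+1) = B.take k ++ [B[k]] := by
    rw [List.take_add_one]; simp [List.getElem?_eq_getElem hk]
  rw [ha, hb, edA_step, ← ha, ← hb]

-- the values the inner loop appends, as a recursion on the zipped triples
def pvScan (ca : Char) : List (Char × Int × Int) → Int → List Int
  | [], _ => []
  | (cb, ul, u) :: L, left =>
      let w := if ca == cb then ul else 1 + min ul (min u left)
      w :: pvScan ca L w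

theorem inner_foldl_eq_scan (ca : Char) (L : List (Char × Int × Int)) :
    ∀ (cs : List Int) (v : Int),
      L.foldl (fun cur x =>
          if ca == x.1 then cur ++ [x.2.1]
          else cur ++ [1 + min x.2.1 (min x.2.2 (PySem.List.pyGetD cur (-1) 0))])
        (cs ++ [v]) = cs ++ [v] ++ pvScan ca L v := by
  induction L with
  | nil => intro cs v; simp [pvScan]
  | cons hd tl ih =>
    intro cs v
    obtain ⟨cb, ul, u⟩ := hd
    simp only [List.foldl_cons, pvScan, PySem.List.pyGetD_neg_one_append_singleton]
    by_cases hc : (ca == cb) = true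
    · simp only [hc, if_true]
      rw [show (cs ++ [v]) ++ [ul] = (cs ++ [v]) ++ [ul] from rfl, ih (cs ++ [v]) ul]
      simp
    · simp only [hc, if_false, Bool.false_eq_true]
      rw [ih (cs ++ [v]) (1 + min ul (min u v))]
      simp

theorem pvRow_getElem (A B : List Char) (i k : Nat) (hk : k < B.length + 1) :
    (pvRow A B i)[k]'(by simp [pvRow]; omega) = editDistanceRecA (A.take i) (B.take k) := by
  simp [pvRow]

theorem pvRow_length (A B : List Char) (i : Nat) : (pvRow A B i).length = B.length + 1 := by
  simp [pvRow]

theorem scan_spec (A B : List Char) (i : Nat) (hi : i < A.length) :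
    ∀ (m k : Nat), k + m = B.length →
      pvScan A[i]
        ((B.drop k).zip (((pvRow A B i).drop k).zip ((pvRow A B i).drop (k+1))))
        (editDistanceRecA (A.take (i+1)) (B.take k)) =
      (List.range' (k+1) m).map (fun j => editDistanceRecA (A.take (i+1)) (B.take j)) := by
  intro m
  induction m with
  | zero =>
    intro k hkm
    have : B.drop k = [] := by rw [List.drop_eq_nil_iff]; omega
    simp [this, pvScan]
  | succ m ihm =>
    intro k hkm
    have hkB : k < B.length := by omega
    have h1 : B.drop k = B[k] :: B.drop (k+1) := List.drop_eq_getElem_cons hkB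
    have hr : k < (pvRow A B i).length := by rw [pvRow_length]; omega
    have hr1 : k + 1 < (pvRow A B i).length := by rw [pvRow_length]; omega
    have h2 : (pvRow A B i).drop k = (pvRow A B i)[k] :: (pvRow A B i).drop (k+1) :=
      List.drop_eq_getElem_cons hr
    have h3 : (pvRow A B i).drop (k+1) = (pvRow A B i)[k+1] :: (pvRow A B i).drop (k+2) :=
      List.drop_eq_getElem_cons hr1
    rw [h1]
    conv_lhs => rw [h2, h3]
    rw [List.zip_cons_cons, List.zip_cons_cons]
    rw [pvScan]
    rw [pvRow_getElem A B i k (by omega), pvRow_getElem A B i (k+1) (by omega)]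
    have hw : (if A[i] == B[k] then editDistanceRecA (A.take i) (B.take k)
        else 1 + min (editDistanceRecA (A.take i) (B.take k))
          (min (editDistanceRecA (A.take i) (B.take (k+1)))
            (editDistanceRecA (A.take (i+1)) (B.take k)))) =
        editDistanceRecA (A.take (i+1)) (B.take (k+1)) := (edA_take_step A B i k hi hkB).symm
    rw [List.range'_succ, List.map_cons]
    simp only [hw]
    congr 1
    rw [show editDistanceRecA (A.take i) (B.take (k+1)) :: (pvRow A B i).drop (k+2) =
          (pvRow A B i).drop (k+1) from by
      rw [List.drop_eq_getElem_cons hr1, pvRow_getElem A B i (k+1) (by omega)]]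
    exact ihm (k+1) (by omega)

theorem edA_nil_take (A : List Char) (i : Nat) (hi : i ≤ A.length) :
    editDistanceRecA (A.take i) ([] : List Char) = (i : Int) := by
  rw [edA_nil_right]; simp [List.length_take]; omega

theorem row_step (A B : List Char) (i : Nat) (hi : i < A.length) :
    (B.zip ((pvRow A B i).zip (PySem.List.slice (pvRow A B i) (some 1) none))).foldl
      (fun cur x =>
        if A[i] == x.1 then cur ++ [x.2.1]
        else cur ++ [1 + min x.2.1 (min x.2.2 (PySem.List.pyGetD cur (-1) 0))])
      ([((1 : Int) + (i : Int))] : List Int) = pvRow A B (i+1) := by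
  have hs : PySem.List.slice (pvRow A B i) (some 1) none = (pvRow A B i).drop 1 := by
    rw [PySem.List.slice_from (pvRow A B i) (a := 1) (by omega)]; rfl
  have h0 : ((1 : Int) + (i : Int)) = editDistanceRecA (A.take (i+1)) (B.take 0) := by
    simp only [List.take_zero]
    rw [edA_nil_take A (i+1) (by omega)]
    omega
  rw [hs, h0]
  have := inner_foldl_eq_scan A[i]
    (B.zip ((pvRow A B i).zip ((pvRow A B i).drop 1))) []
    (editDistanceRecA (A.take (i+1)) (B.take 0))
  simp only [List.nil_append] at this
  rw [this]
  have hz : B.zip ((pvRow A B i).zip ((pvRow A B i).drop 1)) =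
      (B.drop 0).zip (((pvRow A B i).drop 0).zip ((pvRow A B i).drop (0+1))) := by simp
  rw [hz, scan_spec A B i hi B.length 0 (by omega)]
  unfold pvRow
  rw [List.range_eq_range', List.range'_succ, List.map_cons]
  simp

theorem outer_fold (A B : List Char) :
    ∀ (m k : Nat), k + m = A.length →
      (PySem.List.enumerate (A.drop k) (1 + (k : Int))).foldl
        (fun prev ic =>
          (B.zip (prev.zip (PySem.List.slice prev (some 1) none))).foldl
            (fun cur x =>
              if ic.2 == x.1 then cur ++ [x.2.1]
              else cur ++ [1 + min x.2.1 (min x.2.2 (PySem.List.pyGetD cur (-1) 0))])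
            ([ic.1] : List Int))
        (pvRow A B k) = pvRow A B A.length := by
  intro m
  induction m with
  | zero =>
    intro k hkm
    have hk : k = A.length := by omega
    subst hk
    simp
  | succ m ihm =>
    intro k hkm
    have hkA : k < A.length := by omega
    rw [List.drop_eq_getElem_cons hkA]
    simp only [PySem.List.enumerate_cons, List.foldl_cons]
    rw [row_step A B k hkA]
    have h1 : (1 : Int) + (k : Int) + 1 = 1 + ((k+1 : Nat) : Int) := by push_cast; ring
    rw [h1]
    exact ihm (k+1) (by omega)

theorem pvRow_zero (A B : List Char) :
    pvRow A B 0 = PySem.List.pyRange 0 ((B.length : Int) + 1) 1 := by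
  have h : ((B.length : Int) + 1) = (((B.length + 1 : Nat)) : Int) := by push_cast; ring
  rw [h, PySem.List.pyRange_zero_nat]
  unfold pvRow
  apply List.map_congr_left
  intro j hj
  rw [List.mem_range] at hj
  rw [List.take_zero, edA_nil_left]
  simp [List.length_take]
  omega

theorem edA_eq_levAlt (a b : List Char) : editDistanceRecA a b = levAlt a b := by
  simp only [levAlt]
  have he : PySem.List.enumerate a 1 = PySem.List.enumerate (a.drop 0) (1 + ((0:Nat) : Int)) := by
    simp
  rw [he, ← pvRow_zero a b, outer_fold a b a.length 0 (by omega)]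
  unfold pvRow
  rw [List.range_succ, List.map_append, List.map_singleton,
      PySem.List.pyGetD_neg_one_append_singleton]
  simp

theorem spell_checker_recursive_spec : Claim_equal_spell_checker_recursive := by
  intro t d _ hpre
  unfold Spec_spell_checker_recursive
  unfold spell_checker_recursive spell_checker_recursive_alt
  congr 1
  apply PySem.List.foldl_congr_mem
  intro od word hw
  by_cases hmem : word ∈ d
  · simp [hmem]
  · have h5 : 5 ≤ d.length := by
      rcases hpre with h | h
      · exact absurd (h word hw) hmem
      · exact h
    rw [if_pos hmem, if_neg (by simp [hmem])]
    rw [PySem.List.foldl_append_singleton_eq_map, List.nil_append]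
    simp only [edA_eq_levAlt]
    generalize hS : PySem.List.sorted (d.map fun w => (w, levAlt word.toList w.toList))
      (fun p => p.2) false = S
    have hlen : 5 ≤ S.length := by
      rw [← hS, PySem.List.length_sorted, List.length_map]; exact h5
    match S, hlen with
    | s0 :: s1 :: s2 :: s3 :: s4 :: rest, _ =>
    have hr : PySem.List.pyRange 0 5 1 = [0, 1, 2, 3, 4] := by decide
    rw [hr]
    simp only [List.foldl_cons, List.foldl_nil]
    have g0 : PySem.List.pyGetD (s0 :: s1 :: s2 :: s3 :: s4 :: rest) (0 : Int) ("", (0:Int)) = s0 := by simp [pysem]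
    have g1 : PySem.List.pyGetD (s0 :: s1 :: s2 :: s3 :: s4 :: rest) (1 : Int) ("", (0:Int)) = s1 := by simp [pysem]
    have g2 : PySem.List.pyGetD (s0 :: s1 :: s2 :: s3 :: s4 :: rest) (2 : Int) ("", (0:Int)) = s2 := by simp [pysem]
    have g3 : PySem.List.pyGetD (s0 :: s1 :: s2 :: s3 :: s4 :: rest) (3 : Int) ("", (0:Int)) = s3 := by simp [pysem]
    have g4 : PySem.List.pyGetD (s0 :: s1 :: s2 :: s3 :: s4 :: rest) (4 : Int) ("", (0:Int)) = s4 := by simp [pysem]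
    rw [g0, g1, g2, g3, g4]
    have hsl : PySem.List.slice (s0 :: s1 :: s2 :: s3 :: s4 :: rest) none (some 5) =
        [s0, s1, s2, s3, s4] := by
      rw [PySem.List.slice_to (s0 :: s1 :: s2 :: s3 :: s4 :: rest) (b := 5) (by omega)]
      simp [List.take_succ_cons]
    rw [hsl]
    simp [PySem.Dict.modify, PySem.Dict.getD_insert_self, PySem.Dict.insert_insert_self]

theorem spell_checker_recursive_raises : Claim_raises_spell_checker_recursive := by
  unfold Claim_raises_spell_checker_recursive
  refine ⟨?_, by decide⟩
  intro t d _ ⟨⟨w, hw, hwd⟩, hlen⟩ hpre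
  rcases hpre with h | h
  · exact hwd (h w hw)
  · omega

-- self-check that cites the raise-region theorem: B's port really returns the pinned value at the witness
theorem pvRaiseWitnessOut_ok :
    spell_checker_recursive_alt pvRaiseWitness_spell_checker_recursive.1
      pvRaiseWitness_spell_checker_recursive.2 = pvRaiseWitnessOut_spell_checker_recursive := by
  have h := spell_checker_recursive_raises
  unfold Claim_raises_spell_checker_recursive at h
  exact h.2.2.2
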